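-- pv_equiv track=rewrite | github.com/Fondamenti18/fondamenti-di-programmazione | students/1800240/homework01/program02.py | conv_thnd_to_mlns
-- ===== SOURCE A (Python) =====
-- l9 = ['','zero','uno','due','tre','quattro','cinque','sei','sette','otto','nove']
--
-- l19 = ['dieci','undici','dodici','tredici','quattordici','quindici','sedici','diciassette','diciotto','diciannove']
--
-- l99= ['venti','trenta','quaranta','cinquanta','sessanta','settanta','ottanta','novanta']
--
-- def conv_1_to_hun(n):
--     '''Converte i numeri ad 1 e 2 cifre'''
--     while 1 <= n <= 99:
--         if n <= 9:
--             return l9[n+1]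
--         elif 10 <= n < 20:
--             return l19[(n-10)]
--         elif n >= 20 and n % 10 == 0:
--             return l99[(n // 10) -2]
--         elif n % 10 == 1 or n % 10 == 8:
--             return l99[(n//10)-2][0:-1] + l9[(n%10)+1]
--         else :
--             return l99[(n//10)-2] + l9[(n%10)+1]
--
-- def conv_hun_to_thnd(n):
--     '''Converte i numeri a 3 cifre'''
--     while 99 < n <= 999:
--         if n % 100 == 0:
--             if n // 100 != 1:
--                 return l9[(n//100)+1] + 'cento'
--             elif n // 100 == 1:
--                 return 'cento'
--         elif n % 100  in range(80,90):
--             return l9[(n//100)+1] + 'cent' + conv_1_to_hun(n%100)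
--         elif n // 100 == 1:
--             return 'cento' + conv_1_to_hun(n%100)
--         else :
--             return l9[(n//100)+1] + 'cento' + conv_1_to_hun(n%100)
--
-- def conv_thnd_to_mlns(n):
--     '''Converte i numeri da 4 a 6 cifre'''
--     while 999 < n <= 999999:
--         if n % 1000 >= 100:
--             if  1 < n // 1000 <= 99 :
--                 return conv_1_to_hun(n // 1000) + 'mila' + conv_hun_to_thnd(n % 1000)
--             elif 99 < n // 1000 <= 999:
--                 return conv_hun_to_thnd(n // 1000) + 'mila' + conv_hun_to_thnd(n % 1000)
--             elif n // 1000 == 1 and n % 1000 != 0: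
--                 return 'mille' + conv_hun_to_thnd(n % 1000)
--             else :
--                 return conv_hun_to_thnd(n // 1000) + 'mila'
--         if n % 1000 < 100:
--             if  1 < n // 1000 <= 99 and n % 1000 != 0:
--                 return conv_1_to_hun(n // 1000) + 'mila' + conv_1_to_hun(n % 1000)
--             elif 1 < n // 1000 <= 99 and n % 1000 == 0:
--                 return str(conv_1_to_hun(n // 1000)) + 'mila'
--             elif 99 < n // 1000 <= 999:
--                 if n % 1000 != 0:
--                     return conv_hun_to_thnd(n // 1000) + 'mila' + conv_1_to_hun(n % 1000)
--                 elif n % 1000 == 0: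
--                     return conv_hun_to_thnd(n // 1000) + 'mila'
--             elif n // 1000 == 1 and n % 1000 != 0:
--                 return 'mille' + conv_1_to_hun(n % 1000)
--             elif n // 1000 == 1 and n % 1000 == 0:
--                 return 'mille'
-- ===== SOURCE B (Python) =====
-- _units = ['','uno','due','tre','quattro','cinque','sei','sette','otto','nove']
-- _teens = ['dieci','undici','dodici','tredici','quattordici','quindici','sedici','diciassette','diciotto','diciannove']
-- _tens = ['','','venti','trenta','quaranta','cinquanta','sessanta','settanta','ottanta','novanta']
--
-- def _tokens3(n):
--     '''Token stream for 0 <= n <= 999: each word piece, unelided.'''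
--     toks = []
--     if n >= 100:
--         if n // 100 > 1:
--             toks.append(_units[n // 100])
--         toks.append('cento')
--         n = n % 100
--     if 10 <= n <= 19:
--         toks.append(_teens[n - 10])
--     else:
--         if n >= 20:
--             toks.append(_tens[n // 10])
--         if n % 10 != 0:
--             toks.append(_units[n % 10])
--     return toks
--
-- def _elide(prev, t):
--     '''Italian vowel elision between adjacent word pieces.'''
--     return (prev == 'cento' and t.startswith('ottant')) or \
--            (prev in _tens and prev != '' and t in ('uno', 'otto'))
--
-- def conv_thnd_to_mlns(n):
--     '''Converte i numeri da 4 a 6 cifre'''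
--     if not (999 < n <= 999999):
--         return None
--     toks = ['mille'] if n // 1000 == 1 else _tokens3(n // 1000) + ['mila']
--     toks = toks + _tokens3(n % 1000)
--     out = ''
--     prev = ''
--     for t in toks:
--         if _elide(prev, t):
--             out = out[:-1]
--         out = out + t
--         prev = t
--     return out
-- ===== Notes on version B (the rewrite author's own statement) =====
-- stated objective: alternative
-- what changed: Replaces A's three hand-written per-magnitude converters full of elided-spelling special cases by a generic pipeline: emit the number as a flat stream of unelided word tokens (units/teens/tens/cento/mille/mila), then join them with one fold that applies the two Italian elision rules (tens word before uno/otto, cento before ottant-) at token boundaries.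
-- intended difference: On in-range n whose thousands quotient or remainder mod 1000 lies in 180..189, A returns a word with a spurious leading 'uno' before 'cent...' (e.g. 'milleunocentottanta' for 1180) because conv_hun_to_thnd tests n%100 in range(80,90) before the n//100==1 case; B returns the intended word ('millecentottanta'). — e.g. on conv_thnd_to_mlns(1180): A returns some "milleunocentottanta", B returns some "millecentottanta"
import Mathlib
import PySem

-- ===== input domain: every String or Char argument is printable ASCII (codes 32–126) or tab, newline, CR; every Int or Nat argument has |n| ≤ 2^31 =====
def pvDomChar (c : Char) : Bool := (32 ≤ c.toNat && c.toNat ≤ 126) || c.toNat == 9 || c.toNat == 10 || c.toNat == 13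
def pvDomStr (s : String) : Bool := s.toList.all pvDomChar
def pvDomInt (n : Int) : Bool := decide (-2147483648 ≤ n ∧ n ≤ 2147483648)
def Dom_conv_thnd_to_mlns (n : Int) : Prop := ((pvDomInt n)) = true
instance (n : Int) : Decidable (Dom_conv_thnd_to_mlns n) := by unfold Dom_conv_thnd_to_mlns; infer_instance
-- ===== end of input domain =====

-- B rebuilds the word as a stream of unelided tokens joined by one elision fold (objective:
-- alternative algorithm); on n whose thousand-split part lands in 180..189 A prefixes a spurious
-- 'uno' and B returns the intended word (see D_ below).

-- ===== PORT A =====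
def pvL9 : List String := ["","zero","uno","due","tre","quattro","cinque","sei","sette","otto","nove"]
def pvL19 : List String := ["dieci","undici","dodici","tredici","quattordici","quindici","sedici","diciassette","diciotto","diciannove"]
def pvL99 : List String := ["venti","trenta","quaranta","cinquanta","sessanta","settanta","ottanta","novanta"]

-- conv_1_to_hun: the 'while' guard is an if (every branch returns); out-of-guard = Python's None
def pvConv1ToHun (n : Int) : Option String :=
  if 1 ≤ n ∧ n ≤ 99 then
    if n ≤ 9 then PySem.List.pyGet? pvL9 (n + 1)
    else if 10 ≤ n ∧ n < 20 then PySem.List.pyGet? pvL19 (n - 10)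
    else if n ≥ 20 ∧ PySem.Int.mod n 10 = 0 then PySem.List.pyGet? pvL99 (PySem.Int.floordiv n 10 - 2)
    else if PySem.Int.mod n 10 = 1 ∨ PySem.Int.mod n 10 = 8 then
      (PySem.List.pyGet? pvL99 (PySem.Int.floordiv n 10 - 2)).bind fun t =>
        (PySem.List.pyGet? pvL9 (PySem.Int.mod n 10 + 1)).bind fun u =>
          some (PySem.Str.slice t (some 0) (some (-1)) ++ u)
    else
      (PySem.List.pyGet? pvL99 (PySem.Int.floordiv n 10 - 2)).bind fun t =>
        (PySem.List.pyGet? pvL9 (PySem.Int.mod n 10 + 1)).bind fun u =>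
          some (t ++ u)
  else none

-- conv_hun_to_thnd: same transliteration scheme; a None from a nested call propagates as none
-- (in Python that would be a TypeError, but it is unreachable under the guards)
def pvConvHunToThnd (n : Int) : Option String :=
  if 99 < n ∧ n ≤ 999 then
    if PySem.Int.mod n 100 = 0 then
      if PySem.Int.floordiv n 100 ≠ 1 then
        (PySem.List.pyGet? pvL9 (PySem.Int.floordiv n 100 + 1)).bind fun h => some (h ++ "cento")
      else some "cento"
    else if 80 ≤ PySem.Int.mod n 100 ∧ PySem.Int.mod n 100 < 90 then
      (PySem.List.pyGet? pvL9 (PySem.Int.floordiv n 100 + 1)).bind fun h =>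
        (pvConv1ToHun (PySem.Int.mod n 100)).bind fun t => some (h ++ "cent" ++ t)
    else if PySem.Int.floordiv n 100 = 1 then
      (pvConv1ToHun (PySem.Int.mod n 100)).bind fun t => some ("cento" ++ t)
    else
      (PySem.List.pyGet? pvL9 (PySem.Int.floordiv n 100 + 1)).bind fun h =>
        (pvConv1ToHun (PySem.Int.mod n 100)).bind fun t => some (h ++ "cento" ++ t)
  else none

def conv_thnd_to_mlns (n : Int) : Option String :=
  if 999 < n ∧ n ≤ 999999 then
    if PySem.Int.mod n 1000 ≥ 100 then
      if 1 < PySem.Int.floordiv n 1000 ∧ PySem.Int.floordiv n 1000 ≤ 99 then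
        (pvConv1ToHun (PySem.Int.floordiv n 1000)).bind fun a =>
          (pvConvHunToThnd (PySem.Int.mod n 1000)).bind fun b => some (a ++ "mila" ++ b)
      else if 99 < PySem.Int.floordiv n 1000 ∧ PySem.Int.floordiv n 1000 ≤ 999 then
        (pvConvHunToThnd (PySem.Int.floordiv n 1000)).bind fun a =>
          (pvConvHunToThnd (PySem.Int.mod n 1000)).bind fun b => some (a ++ "mila" ++ b)
      else if PySem.Int.floordiv n 1000 = 1 ∧ PySem.Int.mod n 1000 ≠ 0 then
        (pvConvHunToThnd (PySem.Int.mod n 1000)).bind fun b => some ("mille" ++ b)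
      else
        (pvConvHunToThnd (PySem.Int.floordiv n 1000)).bind fun a => some (a ++ "mila")
    else -- the Python 'if n % 1000 < 100' is reached exactly when the first if failed
      if 1 < PySem.Int.floordiv n 1000 ∧ PySem.Int.floordiv n 1000 ≤ 99 ∧ PySem.Int.mod n 1000 ≠ 0 then
        (pvConv1ToHun (PySem.Int.floordiv n 1000)).bind fun a =>
          (pvConv1ToHun (PySem.Int.mod n 1000)).bind fun b => some (a ++ "mila" ++ b)
      else if 1 < PySem.Int.floordiv n 1000 ∧ PySem.Int.floordiv n 1000 ≤ 99 ∧ PySem.Int.mod n 1000 = 0 then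
        -- Python's str() on the (always-string) helper result is the identity here
        (pvConv1ToHun (PySem.Int.floordiv n 1000)).bind fun a => some (a ++ "mila")
      else if 99 < PySem.Int.floordiv n 1000 ∧ PySem.Int.floordiv n 1000 ≤ 999 then
        if PySem.Int.mod n 1000 ≠ 0 then
          (pvConvHunToThnd (PySem.Int.floordiv n 1000)).bind fun a =>
            (pvConv1ToHun (PySem.Int.mod n 1000)).bind fun b => some (a ++ "mila" ++ b)
        else
          (pvConvHunToThnd (PySem.Int.floordiv n 1000)).bind fun a => some (a ++ "mila")
      else if PySem.Int.floordiv n 1000 = 1 ∧ PySem.Int.mod n 1000 ≠ 0 then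
        (pvConv1ToHun (PySem.Int.mod n 1000)).bind fun b => some ("mille" ++ b)
      else if PySem.Int.floordiv n 1000 = 1 ∧ PySem.Int.mod n 1000 = 0 then
        some "mille"
      else none -- unreachable under the guard (Python would re-enter the while and loop forever)
  else none

-- ===== PORT B =====
def pvUnits : List String := ["","uno","due","tre","quattro","cinque","sei","sette","otto","nove"]
def pvTeens : List String := ["dieci","undici","dodici","tredici","quattordici","quindici","sedici","diciassette","diciotto","diciannove"]
def pvTens : List String := ["","","venti","trenta","quaranta","cinquanta","sessanta","settanta","ottanta","novanta"]

-- _tokens3: every plain list index is in range for the 0..999 arguments reachable from the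
-- entry guard, so `getD _ ""` is exact there
def pvTokens3 (n : Int) : List String :=
  let p : List String × Int :=
    if n ≥ 100 then
      ((if PySem.Int.floordiv n 100 > 1 then [pvUnits.getD (PySem.Int.floordiv n 100).toNat ""] else [])
        ++ ["cento"], PySem.Int.mod n 100)
    else ([], n)
  p.1 ++
    (if 10 ≤ p.2 ∧ p.2 ≤ 19 then [pvTeens.getD (p.2 - 10).toNat ""]
     else (if p.2 ≥ 20 then [pvTens.getD (PySem.Int.floordiv p.2 10).toNat ""] else [])
          ++ (if PySem.Int.mod p.2 10 ≠ 0 then [pvUnits.getD (PySem.Int.mod p.2 10).toNat ""] else []))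

def pvElide (prev t : String) : Bool :=
  (prev == "cento" && PySem.Str.startswith t "ottant")
  || (pvTens.contains prev && prev != "" && (t == "uno" || t == "otto"))

def pvGlue : List String → String → String → String
  | [], out, _ => out
  | t :: ts, out, prev =>
      pvGlue ts ((if pvElide prev t then PySem.Str.slice out none (some (-1)) else out) ++ t) t

def conv_thnd_to_mlns_alt (n : Int) : Option String :=
  if 999 < n ∧ n ≤ 999999 then
    some (pvGlue
      ((if PySem.Int.floordiv n 1000 = 1 then ["mille"]
        else pvTokens3 (PySem.Int.floordiv n 1000) ++ ["mila"])
       ++ pvTokens3 (PySem.Int.mod n 1000)) "" "")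
  else none

-- ===== PRECONDITION & SPEC =====
-- On in-range n whose thousands part or remainder-of-1000 lies in 180..189 A returns the word with
-- a spurious 'uno' before 'cent…' (e.g. 'milleunocentottanta' for 1180) because conv_hun_to_thnd
-- tests n%100 in range(80,90) before the n//100==1 case; B returns the intended 'millecentottanta'.
def D_conv_thnd_to_mlns (n : Int) : Prop :=
  (999 < n ∧ n ≤ 999999) ∧
    ((180 ≤ PySem.Int.mod n 1000 ∧ PySem.Int.mod n 1000 ≤ 189)
      ∨ (180 ≤ PySem.Int.floordiv n 1000 ∧ PySem.Int.floordiv n 1000 ≤ 189))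
instance (n : Int) : Decidable (D_conv_thnd_to_mlns n) := by unfold D_conv_thnd_to_mlns; infer_instance

def Spec_conv_thnd_to_mlns (n : Int) (out : Option String) : Prop :=
  ¬ D_conv_thnd_to_mlns n → out = conv_thnd_to_mlns_alt n
instance (n : Int) (out : Option String) : Decidable (Spec_conv_thnd_to_mlns n out) := by
  unfold Spec_conv_thnd_to_mlns; infer_instance

def pvDiffWitness_conv_thnd_to_mlns : Int := 1180
def pvDiffWitnessOut_conv_thnd_to_mlns : (Option String) × (Option String) :=
  (some "milleunocentottanta", some "millecentottanta")

-- ===== CLAIM (what is proved, stated in full; the proofs are below) =====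
def Claim_unchanged_conv_thnd_to_mlns : Prop :=
  ∀ (n : Int), Dom_conv_thnd_to_mlns n → Spec_conv_thnd_to_mlns n (conv_thnd_to_mlns n)
def Claim_changed_conv_thnd_to_mlns : Prop :=
  Dom_conv_thnd_to_mlns (pvDiffWitness_conv_thnd_to_mlns) ∧
  D_conv_thnd_to_mlns (pvDiffWitness_conv_thnd_to_mlns) ∧
  conv_thnd_to_mlns (pvDiffWitness_conv_thnd_to_mlns) = pvDiffWitnessOut_conv_thnd_to_mlns.1 ∧
  conv_thnd_to_mlns_alt (pvDiffWitness_conv_thnd_to_mlns) = pvDiffWitnessOut_conv_thnd_to_mlns.2 ∧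
  pvDiffWitnessOut_conv_thnd_to_mlns.1 ≠ pvDiffWitnessOut_conv_thnd_to_mlns.2
def Claim_exact_conv_thnd_to_mlns : Prop :=
  ∀ (n : Int), Dom_conv_thnd_to_mlns n → D_conv_thnd_to_mlns n →
    conv_thnd_to_mlns n ≠ conv_thnd_to_mlns_alt n

-- ===== LEMMAS AND PROOFS =====

-- finite checks on one two-digit group (Nat-bounded, discharged by decide)
set_option maxRecDepth 40000 in
lemma pvA1 : ∀ k : Nat, k < 99 →
    pvConv1ToHun ((k : Int) + 1) = some (pvGlue (pvTokens3 ((k : Int) + 1)) "" "") := by decide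

set_option maxRecDepth 40000 in
lemma pvTokNE100 : ∀ k : Nat, k < 100 → ∀ t ∈ pvTokens3 (k : Int), t ≠ "" := by decide

set_option maxRecDepth 40000 in
lemma pvHeadNoTrig : ∀ k : Nat, k < 100 → ¬ (80 ≤ k ∧ k ≤ 89) →
    ∀ t ∈ (pvTokens3 (k : Int)).head?, pvElide "cento" t = false ∧ pvElide "" t = false := by decide

set_option maxRecDepth 40000 in
lemma pvHead80s : ∀ k : Nat, 80 ≤ k → k < 90 → (pvTokens3 (k : Int)).head? = some "ottanta" := by decide

lemma pvL9get : ∀ k : Nat, 2 ≤ k → k < 10 →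
    PySem.List.pyGet? pvL9 ((k : Int) + 1) = some (pvUnits.getD k "") ∧ pvUnits.getD k "" ≠ "" := by decide

set_option maxRecDepth 40000 in
lemma pvBug10 : ∀ k : Nat, k < 10 →
    pvConvHunToThnd ((k : Int) + 180) = some ("uno" ++ pvGlue (pvTokens3 ((k : Int) + 180)) "" "") := by
  decide

lemma pvBug (m : Int) (h1 : 180 ≤ m) (h2 : m ≤ 189) :
    pvConvHunToThnd m = some ("uno" ++ pvGlue (pvTokens3 m) "" "") := by
  have hm : m = ((m - 180).toNat : Int) + 180 := by omega
  rw [hm]; exact pvBug10 _ (by omega)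

lemma pvConv1_eq (q : Int) (h1 : 1 ≤ q) (h2 : q ≤ 99) :
    pvConv1ToHun q = some (pvGlue (pvTokens3 q) "" "") := by
  have hq : q = ((q - 1).toNat : Int) + 1 := by omega
  rw [hq]; exact pvA1 _ (by omega)

-- the token list of a three-digit group splits off its hundreds prefix
lemma pvTokens3_split (m : Int) (h1 : 100 ≤ m) (h2 : m ≤ 999) :
    pvTokens3 m = (if 1 < PySem.Int.floordiv m 100 then [pvUnits.getD (PySem.Int.floordiv m 100).toNat ""] else [])
      ++ "cento" :: pvTokens3 (PySem.Int.mod m 100) := by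
  have hr2 : PySem.Int.mod m 100 < 100 := PySem.Int.mod_lt _ (by omega)
  simp only [pvTokens3, if_pos (by omega : m ≥ 100), if_neg (by omega : ¬ PySem.Int.mod m 100 ≥ 100)]
  simp [List.append_assoc]

lemma pvTokens3_ne (m : Int) (h1 : 0 ≤ m) (h2 : m ≤ 999) : ∀ t ∈ pvTokens3 m, t ≠ "" := by
  by_cases hm : m < 100
  · have : m = (m.toNat : Int) := by omega
    rw [this]; exact pvTokNE100 m.toNat (by omega)
  · have hh1 : 1 ≤ PySem.Int.floordiv m 100 := by
      rw [PySem.Int.le_floordiv_iff_mul_le (by omega)]; omega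
    have hh2 : PySem.Int.floordiv m 100 < 10 := by
      rw [PySem.Int.floordiv_lt_iff_lt_mul (by omega)]; omega
    have hr1 : 0 ≤ PySem.Int.mod m 100 := PySem.Int.mod_nonneg _ (by omega)
    have hr2 : PySem.Int.mod m 100 < 100 := PySem.Int.mod_lt _ (by omega)
    rw [pvTokens3_split m (by omega) (by omega)]
    intro t ht
    rcases List.mem_append.mp ht with hpre | htl
    · by_cases hgt : 1 < PySem.Int.floordiv m 100
      · rw [if_pos hgt] at hpre
        have hk : (PySem.Int.floordiv m 100).toNat < 10 ∧ 2 ≤ (PySem.Int.floordiv m 100).toNat := by omega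
        have := (pvL9get (PySem.Int.floordiv m 100).toNat hk.2 hk.1).2
        simpa [List.mem_singleton.mp hpre] using this
      · rw [if_neg hgt] at hpre; simp at hpre
    · rcases List.mem_cons.mp htl with hc | hrem
      · simp [hc]
      · have : PySem.Int.mod m 100 = ((PySem.Int.mod m 100).toNat : Int) := by omega
        rw [this] at hrem
        exact pvTokNE100 _ (by omega) t hrem

-- glue over a concatenation: finish the first list, carry its last token as prev
lemma pvGlue_append (xs ys : List String) (out prev : String) :
    pvGlue (xs ++ ys) out prev = pvGlue ys (pvGlue xs out prev) (xs.getLastD prev) := by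
  induction xs generalizing out prev with
  | nil => simp [pvGlue]
  | cons t ts ih =>
      simp only [List.cons_append, pvGlue, ih]
      rcases ts with _ | ⟨u, us⟩ <;> simp [List.getLastD]

lemma pvStr_dropLast_append (a s : String) (hs : s ≠ "") :
    PySem.Str.slice (a ++ s) none (some (-1)) = a ++ PySem.Str.slice s none (some (-1)) := by
  apply String.toList_inj.mp
  have hs' : s.toList ≠ [] := by simpa using hs
  simp only [PySem.Str.toList_slice, String.toList_append, PySem.Chars.slice,
    PySem.List.slice_to_neg_one]
  exact List.dropLast_append_of_ne_nil hs'

-- an accumulator already split as out ++ s can be peeled off: elision only ever erases inside s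
lemma pvGlue_shift (ts : List String) (out s prev : String)
    (hne : ∀ t ∈ ts, t ≠ "")
    (hhd : s = "" → ∀ t₀ ∈ ts.head?, pvElide prev t₀ = false) :
    pvGlue ts (out ++ s) prev = out ++ pvGlue ts s prev := by
  induction ts generalizing s prev with
  | nil => simp [pvGlue]
  | cons t tl ih =>
      have htne : t ≠ "" := hne t (by simp)
      have hstep : (if pvElide prev t then PySem.Str.slice (out ++ s) none (some (-1)) else (out ++ s)) ++ t
          = out ++ ((if pvElide prev t then PySem.Str.slice s none (some (-1)) else s) ++ t) := by
        by_cases he : pvElide prev t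
        · have hs : s ≠ "" := by
            intro h0
            have := hhd h0 t (by simp)
            simp [this] at he
          simp [he, pvStr_dropLast_append _ _ hs, String.append_assoc]
        · simp [he, String.append_assoc]
      simp only [pvGlue, hstep]
      apply ih
      · intro u hu; exact hne u (by simp [hu])
      · intro h0
        exfalso
        have : ((if pvElide prev t then PySem.Str.slice s none (some (-1)) else s) ++ t).toList = [] := by
          simpa using h0
        rw [String.toList_append] at this
        exact htne (by simpa using List.append_eq_nil_iff.mp this |>.2)

-- prev only matters through its elision behaviour on the first token
lemma pvGlue_prev (ts : List String) (s p p' : String)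
    (h : ∀ t₀ ∈ ts.head?, pvElide p t₀ = pvElide p' t₀) :
    pvGlue ts s p = pvGlue ts s p' := by
  cases ts with
  | nil => rfl
  | cons t tl => simp only [pvGlue, h t (by simp)]

lemma pvElide_mille (t : String) : pvElide "mille" t = false := by
  have h1 : ("mille" : String) ∉ pvTens := by decide
  have h2 : (("mille" : String) == "cento") = false := by decide
  simp [pvElide, h1, h2]
lemma pvElide_mila (t : String) : pvElide "mila" t = false := by
  have h1 : ("mila" : String) ∉ pvTens := by decide
  have h2 : (("mila" : String) == "cento") = false := by decide
  simp [pvElide, h1, h2]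
lemma pvElide_empty (t : String) : pvElide "" t = false := by
  have h2 : (("" : String) == "cento") = false := by decide
  simp [pvElide, h2]
lemma pvElide_to_mila (p : String) : pvElide p "mila" = false := by
  rcases eq_or_ne p "cento" with rfl | hc
  · decide
  · have h1 : (p == "cento") = false := by simpa using hc
    have h2 : (("mila" : String) == "uno") = false := by decide
    have h3 : (("mila" : String) == "otto") = false := by decide
    simp [pvElide, h1, h2, h3]
lemma pvElide_to_cento (p : String) : pvElide p "cento" = false := by
  rcases eq_or_ne p "cento" with rfl | hc
  · decide
  · have h1 : (p == "cento") = false := by simpa using hc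
    have h2 : (("cento" : String) == "uno") = false := by decide
    have h3 : (("cento" : String) == "otto") = false := by decide
    simp [pvElide, h1, h2, h3]

-- glueing one three-digit group after an accumulator acc ++ "cento"
lemma pvGlue_after_cento (rem : Int) (acc : String) (h1 : 0 ≤ rem) (h2 : rem < 100)
    (h3 : ¬ (80 ≤ rem ∧ rem ≤ 89)) :
    pvGlue (pvTokens3 rem) (acc ++ "cento") "cento"
      = (acc ++ "cento") ++ pvGlue (pvTokens3 rem) "" "" := by
  have hk : rem = ((rem.toNat : Nat) : Int) := by omega
  have hhd := pvHeadNoTrig rem.toNat (by omega) (by omega)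
  rw [hk] at *
  have hsh := pvGlue_shift (pvTokens3 (rem.toNat : Int)) (acc ++ "cento") "" "cento"
    (pvTokens3_ne _ (by omega) (by omega)) (fun _ t ht => (hhd t ht).1)
  rw [String.append_empty] at hsh
  rw [hsh, pvGlue_prev _ _ "cento" "" (fun t ht => by rw [(hhd t ht).1, pvElide_empty])]

-- the 80..89 group: the elision really fires and turns "…cento" into "…cent…"
lemma pvGlue_after_cento80 (rem : Int) (acc : String) (h1 : 80 ≤ rem) (h2 : rem ≤ 89) :
    pvGlue (pvTokens3 rem) (acc ++ "cento") "cento"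
      = (acc ++ "cent") ++ pvGlue (pvTokens3 rem) "" "" := by
  have hk : rem = ((rem.toNat : Nat) : Int) := by omega
  rw [hk] at *
  have hne := pvTokens3_ne (rem.toNat : Int) (by omega) (by omega)
  have hhd := pvHead80s rem.toNat (by omega) (by omega)
  rcases hts : pvTokens3 ((rem.toNat : Nat) : Int) with _ | ⟨t0, tl⟩
  · rw [hts] at hhd; simp at hhd
  · rw [hts] at hhd
    have ht0 : t0 = "ottanta" := by simpa using hhd
    subst ht0
    rw [hts] at hne
    have htrig : pvElide "cento" "ottanta" = true := by decide
    have hdrop : PySem.Str.slice (acc ++ "cento") none (some (-1)) = acc ++ "cent" := by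
      rw [pvStr_dropLast_append acc "cento" (by decide)]
      have : PySem.Str.slice "cento" none (some (-1)) = "cent" := by decide
      rw [this]
    have hfst : pvGlue ("ottanta" :: tl) (acc ++ "cento") "cento"
        = pvGlue tl ((acc ++ "cent") ++ "ottanta") "ottanta" := by
      simp only [pvGlue, htrig, if_pos, hdrop]
    have hsnd : pvGlue ("ottanta" :: tl) "" "" = pvGlue tl "ottanta" "ottanta" := by
      simp only [pvGlue, pvElide_empty, Bool.false_eq_true, if_false, String.empty_append]
    rw [hfst, hsnd]
    have hne' : ∀ u ∈ tl, u ≠ "" := fun u hu => hne u (by simp [hu])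
    calc pvGlue tl ((acc ++ "cent") ++ "ottanta") "ottanta"
        = pvGlue tl (acc ++ ("cent" ++ "ottanta")) "ottanta" := by rw [String.append_assoc]
      _ = acc ++ pvGlue tl ("cent" ++ "ottanta") "ottanta" :=
          pvGlue_shift _ _ _ _ hne' (fun h0 => absurd h0 (by decide))
      _ = acc ++ ("cent" ++ pvGlue tl "ottanta" "ottanta") := by
          rw [pvGlue_shift tl "cent" "ottanta" "ottanta" hne' (fun h0 => absurd h0 (by decide))]
      _ = (acc ++ "cent") ++ pvGlue tl "ottanta" "ottanta" := String.append_assoc.symm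

-- A's three-digit helper agrees with B's token glue outside the buggy 180..189 band
lemma pvConvH_eq (m : Int) (hm1 : 100 ≤ m) (hm2 : m ≤ 999) (hD : ¬ (180 ≤ m ∧ m ≤ 189)) :
    pvConvHunToThnd m = some (pvGlue (pvTokens3 m) "" "") := by
  have hh1 : 1 ≤ PySem.Int.floordiv m 100 := by
    rw [PySem.Int.le_floordiv_iff_mul_le (by omega)]; omega
  have hh2 : PySem.Int.floordiv m 100 < 10 := by
    rw [PySem.Int.floordiv_lt_iff_lt_mul (by omega)]; omega
  have hr1 : 0 ≤ PySem.Int.mod m 100 := PySem.Int.mod_nonneg _ (by omega)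
  have hr2 : PySem.Int.mod m 100 < 100 := PySem.Int.mod_lt _ (by omega)
  have hsum := PySem.Int.floordiv_mul_add_mod m 100
  set h := PySem.Int.floordiv m 100 with hhdef
  set rem := PySem.Int.mod m 100 with hremdef
  rw [pvTokens3_split m (by omega) (by omega)]
  unfold pvConvHunToThnd
  rw [if_pos (by omega : 99 < m ∧ m ≤ 999)]
  rw [← hhdef, ← hremdef]
  by_cases hone : h = 1
  · -- no hundreds prefix word
    rw [if_neg (by omega : ¬ 1 < h)]
    have hglue : pvGlue ([] ++ "cento" :: pvTokens3 rem) "" ""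
        = pvGlue (pvTokens3 rem) ("" ++ "cento") "cento" := by
      simp only [List.nil_append, pvGlue, pvElide_empty, Bool.false_eq_true, if_false]
    rw [hglue]
    by_cases hr0 : rem = 0
    · rw [if_pos hr0, if_neg (by omega : ¬ h ≠ 1)]
      rw [hr0, (by decide : pvTokens3 (0 : Int) = []), pvGlue]
      simp
    · rw [if_neg hr0]
      have h80 : ¬ (80 ≤ rem ∧ rem < 90) := by omega
      rw [if_neg h80, if_pos hone]
      rw [pvGlue_after_cento rem "" (by omega) (by omega) (by omega)]
      rw [pvConv1_eq rem (by omega) (by omega)]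
      simp [String.empty_append]
  · -- hundreds digit 2..9: the prefix word from l9
    have hget := pvL9get h.toNat (by omega) (by omega)
    have hcast : ((h.toNat : Nat) : Int) = h := Int.toNat_of_nonneg (by omega)
    rw [hcast] at hget
    rw [if_pos (by omega : 1 < h)]
    have hglue : pvGlue ([pvUnits.getD h.toNat ""] ++ "cento" :: pvTokens3 rem) "" ""
        = pvGlue (pvTokens3 rem) (pvUnits.getD h.toNat "" ++ "cento") "cento" := by
      simp only [List.singleton_append, pvGlue, pvElide_empty, pvElide_to_cento,
        Bool.false_eq_true, if_false, String.empty_append]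
    rw [hglue]
    by_cases hr0 : rem = 0
    · rw [if_pos hr0, if_pos (by omega : h ≠ 1)]
      rw [hget.1, hr0, (by decide : pvTokens3 (0 : Int) = [])]
      simp [pvGlue]
    · rw [if_neg hr0]
      by_cases h80 : 80 ≤ rem ∧ rem < 90
      · rw [if_pos h80]
        rw [hget.1, pvConv1_eq rem (by omega) (by omega)]
        rw [pvGlue_after_cento80 rem _ (by omega) (by omega)]
        simp [String.append_assoc]
      · rw [if_neg h80, if_neg hone]
        rw [hget.1, pvConv1_eq rem (by omega) (by omega)]
        rw [pvGlue_after_cento rem _ (by omega) (by omega) (by omega)]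
        simp [String.append_assoc]

-- B's value, in A's left ++ right shape
lemma pvAlt_eq (n : Int) (h : 999 < n ∧ n ≤ 999999) :
    conv_thnd_to_mlns_alt n =
      some ((if PySem.Int.floordiv n 1000 = 1 then "mille"
             else pvGlue (pvTokens3 (PySem.Int.floordiv n 1000)) "" "" ++ "mila")
            ++ pvGlue (pvTokens3 (PySem.Int.mod n 1000)) "" "") := by
  have hr1 : 0 ≤ PySem.Int.mod n 1000 := PySem.Int.mod_nonneg _ (by omega)
  have hr2 : PySem.Int.mod n 1000 < 1000 := PySem.Int.mod_lt _ (by omega)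
  have hrne := pvTokens3_ne (PySem.Int.mod n 1000) (by omega) (by omega)
  unfold conv_thnd_to_mlns_alt
  rw [if_pos h]
  congr 1
  by_cases hq : PySem.Int.floordiv n 1000 = 1
  · rw [if_pos hq, if_pos hq]
    rw [pvGlue_append]
    have h1 : pvGlue ["mille"] "" "" = "mille" := by decide
    have h2 : (["mille"] : List String).getLastD "" = "mille" := by decide
    rw [h1, h2]
    have hsh := pvGlue_shift (pvTokens3 (PySem.Int.mod n 1000)) "mille" "" "mille" hrne
      (fun _ t _ => pvElide_mille t)
    rw [String.append_empty] at hsh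
    rw [hsh, pvGlue_prev _ _ "mille" "" (by intro t _; rw [pvElide_mille, pvElide_empty])]
  · rw [if_neg hq, if_neg hq]
    rw [List.append_assoc, pvGlue_append]
    have hstep : pvGlue (["mila"] ++ pvTokens3 (PySem.Int.mod n 1000))
        (pvGlue (pvTokens3 (PySem.Int.floordiv n 1000)) "" "")
        ((pvTokens3 (PySem.Int.floordiv n 1000)).getLastD "") =
        pvGlue (pvTokens3 (PySem.Int.mod n 1000))
          (pvGlue (pvTokens3 (PySem.Int.floordiv n 1000)) "" "" ++ "mila") "mila" := by
      simp only [List.singleton_append, pvGlue, pvElide_to_mila, Bool.false_eq_true, if_false]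
    rw [hstep]
    have hsh := pvGlue_shift (pvTokens3 (PySem.Int.mod n 1000))
      (pvGlue (pvTokens3 (PySem.Int.floordiv n 1000)) "" "" ++ "mila") "" "mila" hrne
      (fun _ t _ => pvElide_mila t)
    rw [String.append_empty] at hsh
    rw [hsh, pvGlue_prev _ _ "mila" "" (by intro t _; rw [pvElide_mila, pvElide_empty])]

-- ===== VERDICT (by name: the statements are the Claim_ definitions above) =====
theorem conv_thnd_to_mlns_spec : Claim_unchanged_conv_thnd_to_mlns := by
  intro n _ hD
  by_cases h : 999 < n ∧ n ≤ 999999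
  · have hq1 : 1 ≤ PySem.Int.floordiv n 1000 := by
      rw [PySem.Int.le_floordiv_iff_mul_le (by omega)]; omega
    have hq2 : PySem.Int.floordiv n 1000 ≤ 999 := by
      have := (PySem.Int.floordiv_lt_iff_lt_mul (a := n) (b := 1000) (q := 1000) (by omega)).mpr (by omega)
      omega
    have hr1 : 0 ≤ PySem.Int.mod n 1000 := PySem.Int.mod_nonneg _ (by omega)
    have hr2 : PySem.Int.mod n 1000 < 1000 := PySem.Int.mod_lt _ (by omega)
    have hDr : ¬ (180 ≤ PySem.Int.mod n 1000 ∧ PySem.Int.mod n 1000 ≤ 189) := by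
      intro hx; exact hD ⟨h, Or.inl hx⟩
    have hDq : ¬ (180 ≤ PySem.Int.floordiv n 1000 ∧ PySem.Int.floordiv n 1000 ≤ 189) := by
      intro hx; exact hD ⟨h, Or.inr hx⟩
    have htok0 : pvTokens3 (0 : Int) = [] := by decide
    rw [pvAlt_eq n h]
    unfold conv_thnd_to_mlns
    rw [if_pos h]
    set q := PySem.Int.floordiv n 1000 with hqdef
    set r := PySem.Int.mod n 1000 with hrdef
    by_cases hq : q = 1
    · rw [if_pos hq]
      by_cases hrc : r ≥ 100
      · rw [if_pos hrc, if_neg (by omega : ¬ (1 < q ∧ q ≤ 99)),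
            if_neg (by omega : ¬ (99 < q ∧ q ≤ 999)),
            if_pos (by omega : q = 1 ∧ r ≠ 0),
            pvConvH_eq r (by omega) (by omega) hDr]
        simp
      · rw [if_neg hrc]
        by_cases hr0 : r = 0
        · rw [if_neg (by omega : ¬ (1 < q ∧ q ≤ 99 ∧ r ≠ 0)),
              if_neg (by omega : ¬ (1 < q ∧ q ≤ 99 ∧ r = 0)),
              if_neg (by omega : ¬ (99 < q ∧ q ≤ 999)),
              if_neg (by omega : ¬ (q = 1 ∧ r ≠ 0)),
              if_pos (by omega : q = 1 ∧ r = 0)]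
          rw [hr0, htok0]
          simp [pvGlue]
        · rw [if_neg (by omega : ¬ (1 < q ∧ q ≤ 99 ∧ r ≠ 0)),
              if_neg (by omega : ¬ (1 < q ∧ q ≤ 99 ∧ r = 0)),
              if_neg (by omega : ¬ (99 < q ∧ q ≤ 999)),
              if_pos (by omega : q = 1 ∧ r ≠ 0),
              pvConv1_eq r (by omega) (by omega)]
          simp
    · rw [if_neg hq]
      by_cases hqs : q ≤ 99
      · -- q in 2..99
        by_cases hrc : r ≥ 100
        · rw [if_pos hrc, if_pos (by omega : 1 < q ∧ q ≤ 99),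
              pvConv1_eq q (by omega) (by omega),
              pvConvH_eq r (by omega) (by omega) hDr]
          simp [String.append_assoc]
        · rw [if_neg hrc]
          by_cases hr0 : r = 0
          · rw [if_neg (by omega : ¬ (1 < q ∧ q ≤ 99 ∧ r ≠ 0)),
                if_pos (by omega : 1 < q ∧ q ≤ 99 ∧ r = 0),
                pvConv1_eq q (by omega) (by omega)]
            rw [hr0, htok0]
            simp [pvGlue]
          · rw [if_pos (by omega : 1 < q ∧ q ≤ 99 ∧ r ≠ 0),
                pvConv1_eq q (by omega) (by omega),
                pvConv1_eq r (by omega) (by omega)]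
            simp [String.append_assoc]
      · -- q in 100..999
        by_cases hrc : r ≥ 100
        · rw [if_pos hrc, if_neg (by omega : ¬ (1 < q ∧ q ≤ 99)),
              if_pos (by omega : 99 < q ∧ q ≤ 999),
              pvConvH_eq q (by omega) (by omega) hDq,
              pvConvH_eq r (by omega) (by omega) hDr]
          simp [String.append_assoc]
        · rw [if_neg hrc,
              if_neg (by omega : ¬ (1 < q ∧ q ≤ 99 ∧ r ≠ 0)),
              if_neg (by omega : ¬ (1 < q ∧ q ≤ 99 ∧ r = 0)),
              if_pos (by omega : 99 < q ∧ q ≤ 999)]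
          by_cases hr0 : r = 0
          · rw [if_neg (by omega : ¬ r ≠ 0),
                pvConvH_eq q (by omega) (by omega) hDq]
            rw [hr0, htok0]
            simp [pvGlue]
          · rw [if_pos hr0,
                pvConvH_eq q (by omega) (by omega) hDq,
                pvConv1_eq r (by omega) (by omega)]
            simp [String.append_assoc]
  · unfold conv_thnd_to_mlns conv_thnd_to_mlns_alt
    rw [if_neg h, if_neg h]

theorem conv_thnd_to_mlns_changed : Claim_changed_conv_thnd_to_mlns := by
  unfold Claim_changed_conv_thnd_to_mlns; decide

theorem conv_thnd_to_mlns_tight : Claim_exact_conv_thnd_to_mlns := by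
  intro n _ hDn
  obtain ⟨h, hreg⟩ := hDn
  have hq1 : 1 ≤ PySem.Int.floordiv n 1000 := by
    rw [PySem.Int.le_floordiv_iff_mul_le (by omega)]; omega
  have hq2 : PySem.Int.floordiv n 1000 ≤ 999 := by
    have := (PySem.Int.floordiv_lt_iff_lt_mul (a := n) (b := 1000) (q := 1000) (by omega)).mpr (by omega)
    omega
  have hr1 : 0 ≤ PySem.Int.mod n 1000 := PySem.Int.mod_nonneg _ (by omega)
  have hr2 : PySem.Int.mod n 1000 < 1000 := PySem.Int.mod_lt _ (by omega)
  have htok0 : pvTokens3 (0 : Int) = [] := by decide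
  have hu : ("uno" : String).toList.length = 3 := by decide
  rw [pvAlt_eq n h]
  unfold conv_thnd_to_mlns
  rw [if_pos h]
  set q := PySem.Int.floordiv n 1000 with hqdef
  set r := PySem.Int.mod n 1000 with hrdef
  by_cases hrb : 180 ≤ r ∧ r ≤ 189
  · -- the remainder group is in the buggy band (so r ≥ 100)
    rw [if_pos (by omega : r ≥ 100), pvBug r (by omega) (by omega)]
    by_cases hq : q = 1
    · rw [if_neg (by omega : ¬ (1 < q ∧ q ≤ 99)),
          if_neg (by omega : ¬ (99 < q ∧ q ≤ 999)),
          if_pos (by omega : q = 1 ∧ r ≠ 0), if_pos hq]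
      intro heq
      simp only [Option.bind_some, Option.some.injEq] at heq
      have hlen := congrArg (fun s : String => s.toList.length) heq
      simp only [String.toList_append, List.length_append] at hlen
      rw [hu] at hlen; omega
    · rw [if_neg hq]
      by_cases hqs : q ≤ 99
      · rw [if_pos (by omega : 1 < q ∧ q ≤ 99), pvConv1_eq q (by omega) (by omega)]
        intro heq
        simp only [Option.bind_some, Option.some.injEq] at heq
        have hlen := congrArg (fun s : String => s.toList.length) heq
        simp only [String.toList_append, List.length_append] at hlen
        rw [hu] at hlen; omega
      · rw [if_neg (by omega : ¬ (1 < q ∧ q ≤ 99)), if_pos (by omega : 99 < q ∧ q ≤ 999)]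
        by_cases hqb : 180 ≤ q ∧ q ≤ 189
        · rw [pvBug q (by omega) (by omega)]
          intro heq
          simp only [Option.bind_some, Option.some.injEq] at heq
          have hlen := congrArg (fun s : String => s.toList.length) heq
          simp only [String.toList_append, List.length_append] at hlen
          rw [hu] at hlen; omega
        · rw [pvConvH_eq q (by omega) (by omega) hqb]
          intro heq
          simp only [Option.bind_some, Option.some.injEq] at heq
          have hlen := congrArg (fun s : String => s.toList.length) heq
          simp only [String.toList_append, List.length_append] at hlen
          rw [hu] at hlen; omega
  · -- then the thousands group is in the buggy band: q in 180..189, so 100 ≤ q ≤ 999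
    have hqb : 180 ≤ q ∧ q ≤ 189 := by
      rcases hreg with hx | hx
      · exact absurd hx hrb
      · exact hx
    rw [if_neg (by omega : ¬ q = 1), pvBug q (by omega) (by omega)]
    by_cases hrc : r ≥ 100
    · rw [if_pos hrc, if_neg (by omega : ¬ (1 < q ∧ q ≤ 99)),
          if_pos (by omega : 99 < q ∧ q ≤ 999),
          pvConvH_eq r (by omega) (by omega) (by omega)]
      intro heq
      simp only [Option.bind_some, Option.some.injEq] at heq
      have hlen := congrArg (fun s : String => s.toList.length) heq
      simp only [String.toList_append, List.length_append] at hlen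
      rw [hu] at hlen; omega
    · rw [if_neg hrc,
          if_neg (by omega : ¬ (1 < q ∧ q ≤ 99 ∧ r ≠ 0)),
          if_neg (by omega : ¬ (1 < q ∧ q ≤ 99 ∧ r = 0)),
          if_pos (by omega : 99 < q ∧ q ≤ 999)]
      by_cases hr0 : r = 0
      · rw [if_neg (by omega : ¬ r ≠ 0), hr0, htok0]
        intro heq
        simp only [Option.bind_some, Option.some.injEq, pvGlue] at heq
        have hlen := congrArg (fun s : String => s.toList.length) heq
        simp only [String.toList_append, List.length_append] at hlen
        rw [hu] at hlen
        have hz : ("" : String).toList.length = 0 := by decide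
        rw [hz] at hlen; omega
      · rw [if_pos hr0, pvConv1_eq r (by omega) (by omega)]
        intro heq
        simp only [Option.bind_some, Option.some.injEq] at heq
        have hlen := congrArg (fun s : String => s.toList.length) heq
        simp only [String.toList_append, List.length_append] at hlen
        rw [hu] at hlen; omega
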